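-- pv_equiv track=rewrite | github.com/ilialecha/Programming_2 | From_Last_Year/PARTIAL EXAM 1/partial_exam_1.py | word_composition
-- ===== SOURCE A (Python) =====
-- def word_composition(seq, n):
--
-- 	d = {}
--
-- 	for i in range(len(seq)):
--
-- 		substr = seq[i:i+n]
--
-- 		if substr not in d:
--
-- 			if len(substr) == n:
-- 				d[substr] = 1
--
-- 		else:
-- 			d[substr] += 1
--
-- 	return d
-- ===== SOURCE B (Python) =====
-- def word_composition(seq, n):
-- 	subs = [seq[i:i+n] for i in range(len(seq)) if len(seq[i:i+n]) == n]
-- 	srt = sorted(subs)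
-- 	counts = {}
-- 	i = 0
-- 	while i < len(srt):
-- 		j = i
-- 		while j < len(srt) and srt[j] == srt[i]:
-- 			j += 1
-- 		counts[srt[i]] = j - i
-- 		i = j
-- 	return {s: counts[s] for s in dict.fromkeys(subs)}
-- ===== Notes on version B (the rewrite author's own statement) =====
-- stated objective: alternative
-- what changed: Replaces the single-pass hash-accumulation over a dict with a collect / sort / run-length-scan strategy: all length-n substrings are collected into a list, sorted, counted by a run-length walk over adjacent equal elements, and emitted once per first-occurrence-deduplicated key.
import Mathlib
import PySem

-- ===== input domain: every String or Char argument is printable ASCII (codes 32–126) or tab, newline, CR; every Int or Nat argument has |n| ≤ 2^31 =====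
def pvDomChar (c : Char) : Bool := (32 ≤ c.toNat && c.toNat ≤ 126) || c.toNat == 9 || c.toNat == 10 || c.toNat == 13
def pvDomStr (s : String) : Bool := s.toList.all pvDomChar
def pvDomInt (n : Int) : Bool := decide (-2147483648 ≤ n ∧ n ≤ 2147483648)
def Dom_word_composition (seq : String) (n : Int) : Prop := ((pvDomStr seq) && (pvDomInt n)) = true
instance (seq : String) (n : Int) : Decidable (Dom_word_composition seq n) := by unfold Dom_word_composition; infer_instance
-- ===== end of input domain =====

-- B replaces A's one-pass dict accumulation by collect, sort, run-length-count, then emit in first-occurrence order.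

-- ===== PORT A =====
-- literal port of A: loop i over range(len(seq)), slice, membership test, insert 1 / d[substr] += 1
def word_composition (seq : String) (n : Int) : List (String × Int) :=
  ((PySem.List.pyRange 0 (PySem.Str.len seq) 1).foldl
    (fun (d : PySem.Dict String Int) i =>
      let substr := PySem.Str.slice seq (some i) (some (i + n))
      if d.contains substr then
        d.modify substr 0 (· + 1)
      else if PySem.Str.len substr = n then
        d.insert substr 1
      else d)
    PySem.Dict.empty).items

-- ===== PORT B =====
-- literal port of B: subs = [seq[i:i+n] for i in range(len(seq)) if len == n];
-- srt = sorted(subs); the while loop walks srt one run of equal adjacent elements at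
-- a time (pvRuns: the inner scanning while is the takeWhile/dropWhile split of the
-- current run) recording each run's length in counts; the dict comprehension
-- {s: counts[s] for s in dict.fromkeys(subs)} has distinct keys, so its items are one
-- pair per deduplicated key in order (counts[s] always has the key there; ported as getD).
def pvRuns : List String → PySem.Dict String Int → PySem.Dict String Int
  | [], counts => counts
  | x :: rest, counts =>
    pvRuns (rest.dropWhile (fun y => y == x))
      (counts.insert x (1 + (rest.takeWhile (fun y => y == x)).length))
  termination_by l _ => l.length
  decreasing_by simp [Nat.lt_succ_iff, List.length_dropWhile_le]

def word_composition_alt (seq : String) (n : Int) : List (String × Int) :=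
  let subs := (((PySem.List.pyRange 0 (PySem.Str.len seq) 1).map
      (fun i => PySem.Str.slice seq (some i) (some (i + n)))).filter
      (fun s => PySem.Str.len s = n))
  let counts := pvRuns (PySem.List.sorted subs (fun s => s)) PySem.Dict.empty
  (PySem.List.dedup subs).map (fun s => (s, counts.getD s 0))

-- ===== PRECONDITION & SPEC =====
def Spec_word_composition (seq : String) (n : Int) (out : List (String × Int)) : Prop := out = word_composition_alt seq n
instance (seq : String) (n : Int) (out : List (String × Int)) : Decidable (Spec_word_composition seq n out) := by unfold Spec_word_composition; infer_instance

-- ===== CLAIM (what is proved, stated in full; the proofs are below) =====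
def Claim_equal_word_composition : Prop := ∀ (seq : String) (n : Int), Dom_word_composition seq n → Spec_word_composition seq n (word_composition seq n)

-- ===== LEMMAS AND PROOFS =====

-- A's loop body, on a dict whose keys all have length n, acts as the Counter step
-- (d.modify s 0 (+1)) on length-n substrings and as the identity on the rest.
theorem pv_step_eq (n : Int) (d : PySem.Dict String Int) (s : String)
    (hinv : ∀ k ∈ d.keys, PySem.Str.len k = n) :
    (if d.contains s then d.modify s 0 (· + 1)
     else if PySem.Str.len s = n then d.insert s 1 else d)
    = (if PySem.Str.len s = n then d.modify s 0 (· + 1) else d) := by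
  by_cases hl : PySem.Str.len s = n
  · by_cases hc : d.contains s
    · rw [if_pos hc, if_pos hl]
    · have hc' : d.contains s = false := by simpa using hc
      simp only [hc', Bool.false_eq_true, if_false, if_pos hl]
      simp [PySem.Dict.modify, PySem.Dict.getD_of_not_contains, hc']
  · have hc : ¬ (d.contains s = true) := by
      intro hc
      exact hl (hinv s ((PySem.Dict.contains_iff_mem_keys d s).1 hc))
    rw [if_neg hc, if_neg hl, if_neg hl]

-- folding A's body over the index list, from a dict satisfying the invariant,
-- is Counter-folding over the length-n substrings
theorem pv_foldl_eq (key : Int → String) (n : Int) (L : List Int)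
    (d : PySem.Dict String Int)
    (hinv : ∀ k ∈ d.keys, PySem.Str.len k = n) :
    L.foldl (fun (d : PySem.Dict String Int) i =>
      let substr := key i
      if d.contains substr then d.modify substr 0 (· + 1)
      else if PySem.Str.len substr = n then d.insert substr 1 else d) d
    = ((L.map key).filter (fun s => PySem.Str.len s = n)).foldl
        (fun d s => d.modify s 0 (· + 1)) d := by
  induction L generalizing d with
  | nil => rfl
  | cons i L ih =>
    rw [List.foldl_cons, List.map_cons, List.filter_cons]
    show (L.foldl _ (if d.contains (key i) then d.modify (key i) 0 (· + 1)
      else if PySem.Str.len (key i) = n then d.insert (key i) 1 else d)) = _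
    rw [pv_step_eq n d (key i) hinv]
    by_cases hl : PySem.Str.len (key i) = n
    · have hinv' : ∀ k ∈ (d.modify (key i) 0 (· + 1)).keys, PySem.Str.len k = n := by
        intro k hk
        simp only [PySem.Dict.modify] at hk
        rcases (PySem.Dict.mem_keys_insert _ _ _ _).1 hk with hk | hk
        · subst hk; exact hl
        · exact hinv k hk
      rw [if_pos hl, if_pos (by simpa using hl), List.foldl_cons, ih _ hinv']
    · rw [if_neg hl, if_neg (by simpa using hl), ih _ hinv]

-- run-length over a ≤-sorted list counts every element of the list; other keys keep
-- their initial entry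
theorem pv_runs_getD (l : List String) (d : PySem.Dict String Int)
    (hs : l.Pairwise (· ≤ ·)) (s : String) :
    (pvRuns l d).getD s 0 = if s ∈ l then (l.count s : Int) else d.getD s 0 := by
  revert hs
  induction l, d using pvRuns.induct with
  | case1 counts => intro hs; simp [pvRuns]
  | case2 x rest counts ih =>
    intro hs
    rw [pvRuns]
    have hpr : rest.Pairwise (· ≤ ·) := hs.of_cons
    have hle : ∀ y ∈ rest, x ≤ y := fun y hy => List.rel_of_pairwise_cons hs hy
    have hsplit : rest.takeWhile (fun y => y == x) ++ rest.dropWhile (fun y => y == x) = rest :=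
      List.takeWhile_append_dropWhile
    have hrun : ∀ y ∈ rest.takeWhile (fun y => y == x), y = x := by
      intro y hy
      simpa using List.mem_takeWhile_imp hy
    have hxnot : x ∉ rest.dropWhile (fun y => y == x) := by
      intro hx
      cases hdrop : rest.dropWhile (fun y => y == x) with
      | nil => rw [hdrop] at hx; exact absurd hx (List.not_mem_nil)
      | cons z t =>
        have hz : ¬ (z == x) := by
          have := List.head_dropWhile_not (p := fun y => y == x) (l := rest)
            (by rw [hdrop]; simp)
          simpa [hdrop] using this
        have hzx : z ≠ x := by simpa using hz
        have hzr : z ∈ rest := (List.dropWhile_sublist _).mem (by rw [hdrop]; simp)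
        have hxz : x ≤ z := hle z hzr
        rw [hdrop] at hx
        rcases List.mem_cons.1 hx with h | h
        · exact hzx h.symm
        · have hpd : (z :: t).Pairwise (· ≤ ·) := by
            rw [← hdrop]; exact hpr.sublist (List.dropWhile_sublist _)
          have : z ≤ x := List.rel_of_pairwise_cons hpd h
          exact hzx (le_antisymm this hxz)
    have hcx : (x :: rest).count x = 1 + (rest.takeWhile (fun y => y == x)).length := by
      have h3 : (rest.takeWhile (fun y => y == x) ++ rest.dropWhile (fun y => y == x)).count x
          = rest.count x := by rw [hsplit]
      rw [List.count_append] at h3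
      have h1 : (rest.takeWhile (fun y => y == x)).count x
          = (rest.takeWhile (fun y => y == x)).length :=
        List.count_eq_length.2 (fun y hy => by simp [hrun y hy])
      have h2 : (rest.dropWhile (fun y => y == x)).count x = 0 :=
        List.count_eq_zero.2 hxnot
      rw [List.count_cons_self]
      omega
    rw [ih ((hpr.sublist (List.dropWhile_sublist _)))]
    by_cases hsx : s = x
    · subst hsx
      rw [if_neg hxnot, if_pos (List.mem_cons_self), PySem.Dict.getD_insert,
        if_pos rfl, hcx]
      push_cast
      ring
    · have hmem : s ∈ rest.dropWhile (fun y => y == x) ↔ s ∈ x :: rest := by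
        constructor
        · intro h; exact List.mem_cons_of_mem _ ((List.dropWhile_sublist _).mem h)
        · intro h
          rcases List.mem_cons.1 h with h | h
          · exact absurd h hsx
          · rw [← hsplit] at h
            rcases List.mem_append.1 h with h | h
            · exact absurd (hrun s h) hsx
            · exact h
      have hcnt : (rest.dropWhile (fun y => y == x)).count s = (x :: rest).count s := by
        have h3 : (rest.takeWhile (fun y => y == x) ++ rest.dropWhile (fun y => y == x)).count s
            = rest.count s := by rw [hsplit]
        rw [List.count_append] at h3
        have h4 : (rest.takeWhile (fun y => y == x)).count s = 0 :=
          List.count_eq_zero.2 (fun h => hsx (hrun s h))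
        have h5 : (x :: rest).count s = rest.count s := by
          simp [List.count_cons, Ne.symm hsx]
        omega
      simp only [hmem, hcnt]
      by_cases hm : s ∈ x :: rest
      · simp [hm]
      · simp [hm, PySem.Dict.getD_insert, hsx]

theorem word_composition_spec : Claim_equal_word_composition := by
  intro seq n _
  unfold Spec_word_composition word_composition word_composition_alt
  simp only []
  rw [pv_foldl_eq (fun i => PySem.Str.slice seq (some i) (some (i + n))) n _
      PySem.Dict.empty (by simp [PySem.Dict.keys_empty])]
  rw [← PySem.Dict.counter_eq_foldl, PySem.Dict.items_counter,
    PySem.List.dedup_eq_ofList]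
  apply List.map_congr_left
  intro s hsm
  have hsub : s ∈ (((PySem.List.pyRange 0 (PySem.Str.len seq) 1).map
      (fun i => PySem.Str.slice seq (some i) (some (i + n)))).filter
      (fun s => PySem.Str.len s = n)) := by
    simpa using (PySem.Set.mem_ofList _ _).1 hsm
  rw [pv_runs_getD _ _ (PySem.List.sorted_pairwise _ _) s,
    if_pos ((PySem.List.mem_sorted _ _ _ _).2 hsub)]
  rw [(PySem.List.sorted_perm _ _ _).count_eq]
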